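-- pv_equiv track=rewrite | github.com/nagielhachem/Distributed-Memory | src/master.py | merge_responses
-- ===== SOURCE A (Python) =====
-- def merge_responses(responses):
--     """
--     Merge responses returned by slaves into one response.
--         Group responses by key:
--             [ (rank, (key, array)) ]   --> { key: [ (rank, array) ] }
--         Order by key, Concatenate arrays with same key:
--             { key: [ (rank, array) ] } --> [ arrays concatenation ordered by key ]
--
--     Params:
--         :responses -- [(int, (int, [])] : [ (rank, (key, slave response array)) ]
--
--     Return:
--         :results   -- [[]] : [ arrays concatenation ordered by key ]
--     """
--
--     # group respones by key
--     arrays = {}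
--     for rank, response in responses:
--         key, array = response
--         if key not in arrays:
--             arrays[key] = []
--         arrays[key].append((rank, array))
--
--     # order arrays by key
--     # concatenate arrays with same key
--     results = []
--     for key in sorted(arrays.keys()):
--         result = []
--         for response in sorted(arrays[key]):
--             result += response[1]
--         results.append(result)
--     return results
-- ===== SOURCE B (Python) =====
-- def merge_responses(responses):
--     keys = sorted({key for _, (key, _) in responses})
--     return [
--         [x
--          for _, array in sorted((rank, array)
--                                 for rank, (key, array) in responses
--                                 if key == k)
--          for x in array]
--         for k in keys
--     ]
-- ===== Notes on version B (the rewrite author's own statement) =====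
-- stated objective: simpler
-- what changed: B drops A's dict-based grouping entirely: it sorts the distinct keys once and builds each group's concatenation by a per-key filter comprehension over the input, all in one nested comprehension.
import Mathlib
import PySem

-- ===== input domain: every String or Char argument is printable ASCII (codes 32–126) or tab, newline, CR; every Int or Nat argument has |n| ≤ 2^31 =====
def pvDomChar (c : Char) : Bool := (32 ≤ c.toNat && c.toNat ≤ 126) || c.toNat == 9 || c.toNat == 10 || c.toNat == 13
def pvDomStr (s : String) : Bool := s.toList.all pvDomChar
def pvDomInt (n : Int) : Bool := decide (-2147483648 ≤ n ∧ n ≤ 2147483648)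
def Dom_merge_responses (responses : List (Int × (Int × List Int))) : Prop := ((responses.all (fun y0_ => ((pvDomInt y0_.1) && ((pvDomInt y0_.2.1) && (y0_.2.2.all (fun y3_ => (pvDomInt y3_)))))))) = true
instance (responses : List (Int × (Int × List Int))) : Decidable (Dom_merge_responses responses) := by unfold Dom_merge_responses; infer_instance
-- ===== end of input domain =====

-- B replaces A's dict-grouping with sorted distinct keys plus a per-key filter comprehension (simpler; no index structure).

-- ===== PORT A =====
-- 'arrays[key]' in the output loop is ported as getD with default [] — exact, since that loop
-- iterates only over keys of 'arrays', so the lookup never raises.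
def merge_responses (responses : List (Int × (Int × List Int))) : List (List Int) :=
  let arrays : PySem.Dict Int (List (Int × List Int)) :=
    responses.foldl (fun arrays p =>
      let arrays := if arrays.contains p.2.1 then arrays else arrays.insert p.2.1 []
      arrays.insert p.2.1 (arrays.getD p.2.1 [] ++ [(p.1, p.2.2)])) PySem.Dict.empty
  (PySem.List.sorted arrays.keys (fun k => k) false).foldl
    (fun results key =>
      results ++ [(PySem.List.sorted2 (arrays.getD key []) (fun q => q.1) (fun q => q.2) false).foldl
        (fun result q => result ++ q.2) []]) []

-- ===== PORT B =====
def merge_responses_alt (responses : List (Int × (Int × List Int))) : List (List Int) :=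
  let keys := PySem.List.sorted (PySem.Set.ofList (responses.map (fun p => p.2.1))) (fun k => k) false
  keys.map (fun k =>
    (PySem.List.sorted2 ((responses.filter (fun p => p.2.1 == k)).map (fun p => (p.1, p.2.2)))
        (fun q => q.1) (fun q => q.2) false).flatMap (fun q => q.2))

-- ===== PRECONDITION & SPEC =====
def Spec_merge_responses (responses : List (Int × (Int × List Int))) (out : List (List Int)) : Prop := out = merge_responses_alt responses
instance (responses : List (Int × (Int × List Int))) (out : List (List Int)) : Decidable (Spec_merge_responses responses out) := by unfold Spec_merge_responses; infer_instance

-- ===== CLAIM (what is proved, stated in full; the proofs are below) =====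
def Claim_equal_merge_responses : Prop := ∀ (responses : List (Int × (Int × List Int))), Dom_merge_responses responses → Spec_merge_responses responses (merge_responses responses)

-- ===== LEMMAS AND PROOFS =====

-- A's grouping step ('if key not in arrays: arrays[key] = []' then append) is d[k] = d.get(k, []) ++ [v]
lemma pv_step_eq_modify :
    (fun (d : PySem.Dict Int (List (Int × List Int))) (p : Int × (Int × List Int)) =>
      let d1 := if d.contains p.2.1 then d else d.insert p.2.1 []
      d1.insert p.2.1 (d1.getD p.2.1 [] ++ [(p.1, p.2.2)]))
    = (fun d p => d.modify p.2.1 [] (· ++ [(p.1, p.2.2)])) := by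
  funext d p
  by_cases h : d.contains p.2.1 = true
  · simp [h, PySem.Dict.modify]
  · simp only [Bool.not_eq_true] at h
    simp [h, PySem.Dict.modify, PySem.Dict.insert_insert_self,
      PySem.Dict.getD_of_not_contains _ _ h]

-- keys of the grouping fold = first occurrences of the response keys
lemma pv_keys_fold (responses : List (Int × (Int × List Int))) :
    (responses.foldl (fun d p => d.modify p.2.1 [] (· ++ [(p.1, p.2.2)])) PySem.Dict.empty).keys
      = PySem.Set.ofList (responses.map (fun p => p.2.1)) := by
  rw [PySem.Dict.keys_foldl_modify_key responses (fun p => p.2.1) []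
        (fun _ p => (· ++ [(p.1, p.2.2)])) PySem.Dict.empty]
  simp [PySem.Set.update_nil_left]

-- per-key bucket of the grouping fold = the filtered (rank, array) pairs in input order
lemma pv_getD_fold (responses : List (Int × (Int × List Int))) (c : Int) :
    (responses.foldl (fun d p => d.modify p.2.1 [] (· ++ [(p.1, p.2.2)])) PySem.Dict.empty).getD c []
      = (responses.filter (fun p => p.2.1 == c)).map (fun p => (p.1, p.2.2)) := by
  have h := PySem.Dict.getD_foldl_modify_append
    (responses.map (fun p => (p.2.1, (p.1, p.2.2)))) PySem.Dict.empty c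
  rw [List.foldl_map] at h
  simp only [h, List.filter_map, List.map_map]
  simp [Function.comp_def]

-- ===== VERDICT (by name: the statement is the Claim_ definition above) =====
theorem merge_responses_spec : Claim_equal_merge_responses := by
  intro responses _
  unfold Spec_merge_responses merge_responses merge_responses_alt
  simp only [pv_step_eq_modify, pv_keys_fold, pv_getD_fold]
  simp only [PySem.List.foldl_append_singleton_eq_map]
  simp only [PySem.List.foldl_append_eq_flatMap, List.nil_append]
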